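-- pv_equiv track=rewrite | github.com/c-host/bagh | tools/gnc/gnc_verb_sort_and_filter/populate_verbs_json.py | select_voice_forms
-- ===== SOURCE A (Python) =====
-- def select_voice_forms(forms_data, voice_preference, voice_priority):
--     """Select forms based on voice preference and priority."""
--     if not forms_data:
--         return []
--
--     # Try preferred voice first
--     if voice_preference:
--         preferred_forms = [
--             f
--             for f in forms_data
--             if f.get("parsed_features", {}).get("voice") == voice_preference
--         ]
--         if preferred_forms:
--             return preferred_forms
--
--     # Try voice priority order
--     for voice in voice_priority:
--         voice_forms = [
--             f for f in forms_data if f.get("parsed_features", {}).get("voice") == voice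
--         ]
--         if voice_forms:
--             return voice_forms
--
--     # Default to all forms if no voice matches
--     return forms_data
-- ===== SOURCE B (Python) =====
-- def select_voice_forms(forms_data, voice_preference, voice_priority):
--     """Select forms based on voice preference and priority (single-pass grouping)."""
--     groups = {}
--     for f in forms_data:
--         groups.setdefault(f.get("parsed_features", {}).get("voice"), []).append(f)
--     if voice_preference and groups.get(voice_preference):
--         return groups[voice_preference]
--     for voice in voice_priority:
--         if groups.get(voice):
--             return groups[voice]
--     return forms_data
-- ===== Notes on version B (the rewrite author's own statement) =====
-- stated objective: faster
-- what changed: Replaces the per-candidate-voice filtering scans of forms_data with one grouping pass building an insertion-ordered dict voice -> forms, after which each candidate voice is a single dict lookup.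
import Mathlib
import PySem

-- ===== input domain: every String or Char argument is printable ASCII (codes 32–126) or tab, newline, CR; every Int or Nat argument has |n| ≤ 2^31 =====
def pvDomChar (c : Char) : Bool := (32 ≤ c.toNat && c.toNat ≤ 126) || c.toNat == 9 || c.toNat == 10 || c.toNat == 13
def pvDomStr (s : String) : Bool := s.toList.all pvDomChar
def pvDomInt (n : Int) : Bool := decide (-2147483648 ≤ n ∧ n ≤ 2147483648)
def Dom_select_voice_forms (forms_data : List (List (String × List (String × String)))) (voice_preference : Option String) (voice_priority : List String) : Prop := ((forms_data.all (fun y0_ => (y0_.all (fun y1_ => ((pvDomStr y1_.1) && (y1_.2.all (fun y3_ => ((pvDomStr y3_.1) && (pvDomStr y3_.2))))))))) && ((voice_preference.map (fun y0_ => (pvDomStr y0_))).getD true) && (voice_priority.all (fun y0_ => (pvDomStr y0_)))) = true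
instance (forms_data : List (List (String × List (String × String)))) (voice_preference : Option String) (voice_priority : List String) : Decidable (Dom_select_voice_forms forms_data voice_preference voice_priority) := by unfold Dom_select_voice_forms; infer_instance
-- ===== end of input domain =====

-- B replaces A's repeated filtering scans of forms_data (one per candidate voice) with a
-- single grouping pass into an insertion-ordered dict voice -> forms, then dict lookups.


-- ===== PORT A =====
-- f.get("parsed_features", {}).get("voice")  (dict lookups via PySem.Dict)
def pvVoiceOf (f : List (String × List (String × String))) : Option String :=
  (PySem.Dict.mk ((PySem.Dict.mk f).getD "parsed_features" [])).get? "voice"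

-- Python truthiness of voice_preference (None and "" are falsy)
def pvPrefTruthy (voice_preference : Option String) : Bool :=
  match voice_preference with
  | none => false
  | some p => p ≠ ""

-- the 'for voice in voice_priority' loop of A
def pvPrioLoopA (forms_data : List (List (String × List (String × String)))) :
    List String → List (List (String × List (String × String)))
  | [] => forms_data
  | v :: rest =>
    let voice_forms := forms_data.filter (fun f => pvVoiceOf f == some v)
    if voice_forms ≠ [] then voice_forms else pvPrioLoopA forms_data rest

def select_voice_forms (forms_data : List (List (String × List (String × String)))) (voice_preference : Option String) (voice_priority : List String) : List (List (String × List (String × String))) :=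
  if forms_data = [] then []
  else
    let preferred_forms :=
      if pvPrefTruthy voice_preference then
        forms_data.filter (fun f => pvVoiceOf f == voice_preference)
      else []
    if pvPrefTruthy voice_preference ∧ preferred_forms ≠ [] then preferred_forms
    else pvPrioLoopA forms_data voice_priority

-- ===== PORT B =====
-- the grouping pass: ordered dict (voice value -> forms with that voice, in input order)
def pvGroups (forms_data : List (List (String × List (String × String)))) :
    PySem.Dict (Option String) (List (List (String × List (String × String)))) :=
  (forms_data.map (fun f => (pvVoiceOf f, f))).foldl
    (fun d p => d.modify p.1 [] (· ++ [p.2])) PySem.Dict.empty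

-- the 'for voice in voice_priority' scan of B (dict lookups only)
def pvPrioLoopB (groups : PySem.Dict (Option String) (List (List (String × List (String × String)))))
    (forms_data : List (List (String × List (String × String)))) :
    List String → List (List (String × List (String × String)))
  | [] => forms_data
  | v :: rest =>
    if groups.getD (some v) [] ≠ [] then groups.getD (some v) []
    else pvPrioLoopB groups forms_data rest

def select_voice_forms_alt (forms_data : List (List (String × List (String × String)))) (voice_preference : Option String) (voice_priority : List String) : List (List (String × List (String × String))) :=
  let groups := pvGroups forms_data
  if pvPrefTruthy voice_preference ∧ groups.getD voice_preference [] ≠ [] then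
    groups.getD voice_preference []
  else pvPrioLoopB groups forms_data voice_priority

-- ===== PRECONDITION & SPEC =====
def Spec_select_voice_forms (forms_data : List (List (String × List (String × String)))) (voice_preference : Option String) (voice_priority : List String) (out : List (List (String × List (String × String)))) : Prop := out = select_voice_forms_alt forms_data voice_preference voice_priority
instance (forms_data : List (List (String × List (String × String)))) (voice_preference : Option String) (voice_priority : List String) (out : List (List (String × List (String × String)))) : Decidable (Spec_select_voice_forms forms_data voice_preference voice_priority out) := by unfold Spec_select_voice_forms; infer_instance

-- ===== CLAIM (what is proved, stated in full; the proofs are below) =====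
def Claim_equal_select_voice_forms : Prop := ∀ (forms_data : List (List (String × List (String × String)))) (voice_preference : Option String) (voice_priority : List String), Dom_select_voice_forms forms_data voice_preference voice_priority → Spec_select_voice_forms forms_data voice_preference voice_priority (select_voice_forms forms_data voice_preference voice_priority)

-- ===== LEMMAS AND PROOFS =====

-- B's dict lookup for a voice is A's filter of forms_data by that voice
theorem pvGroups_getD (forms_data : List (List (String × List (String × String)))) (k : Option String) :
    (pvGroups forms_data).getD k [] = forms_data.filter (fun f => pvVoiceOf f == k) := by
  unfold pvGroups
  rw [PySem.Dict.getD_foldl_modify_append]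
  simp [PySem.Dict.getD_empty, List.filter_map, Function.comp_def]

theorem pvPrioLoop_eq (forms_data : List (List (String × List (String × String)))) (pr : List String) :
    pvPrioLoopB (pvGroups forms_data) forms_data pr = pvPrioLoopA forms_data pr := by
  induction pr with
  | nil => rfl
  | cons v rest ih =>
    simp only [pvPrioLoopA, pvPrioLoopB, pvGroups_getD, ih]

theorem pvPrioLoopA_nil (pr : List String) : pvPrioLoopA [] pr = [] := by
  induction pr with
  | nil => rfl
  | cons v rest ih => simp [pvPrioLoopA, ih]

-- ===== VERDICT (by name: the statement is the Claim_ definition above) =====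
theorem select_voice_forms_spec : Claim_equal_select_voice_forms := by
  intro forms_data voice_preference voice_priority _
  unfold Spec_select_voice_forms select_voice_forms select_voice_forms_alt
  by_cases hnil : forms_data = []
  · subst hnil
    rw [if_pos rfl]
    simp [pvGroups_getD, pvPrioLoop_eq, pvPrioLoopA_nil]
  · rw [if_neg hnil]
    simp only [pvGroups_getD, pvPrioLoop_eq]
    by_cases ht : pvPrefTruthy voice_preference = true
    · simp [ht]
    · simp [ht]
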